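-- pv_equiv track=rewrite | github.com/rjbarbour/ai-session-vault | scripts/audit_sessions.py | find_orphan_cwds
-- ===== SOURCE A (Python) =====
-- from collections import defaultdict
--
-- def find_orphan_cwds(all_cwds, known_paths):
--     """Find session cwds that don't match any known project directory.
--
--     Excludes Co-work /sessions/* paths (expected to be orphans).
--     """
--     orphans = defaultdict(int)
--     known_set = set(known_paths)
--     for cwd, count in all_cwds.items():
--         # Co-work sessions use /sessions/<name> — not real project paths
--         if cwd.startswith("/sessions/"):
--             continue
--         matched = False
--         for known in known_set:
--             if cwd == known or cwd.startswith(known + "/"):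
--                 matched = True
--                 break
--         if not matched:
--             orphans[cwd] += count
--     return orphans
-- ===== SOURCE B (Python) =====
-- def find_orphan_cwds(all_cwds, known_paths):
--     """Find session cwds that don't match any known project directory.
--
--     Instead of scanning every known path per cwd, check the cwd itself and
--     each of its ancestor prefixes cut at a '/' boundary against the set.
--     """
--     known = set(known_paths)
--     orphans = {}
--     for cwd, count in all_cwds.items():
--         if cwd.startswith("/sessions/"):
--             continue
--         if cwd in known:
--             continue
--         if any(cwd[:i] in known for i, ch in enumerate(cwd) if ch == "/"):
--             continue
--         orphans[cwd] = orphans.get(cwd, 0) + count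
--     return orphans
-- ===== Notes on version B (the rewrite author's own statement) =====
-- stated objective: faster
-- what changed: Instead of scanning every known path for each cwd, B checks the cwd and each of its '/'-boundary ancestor prefixes for membership in the known-path set.
import Mathlib
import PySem

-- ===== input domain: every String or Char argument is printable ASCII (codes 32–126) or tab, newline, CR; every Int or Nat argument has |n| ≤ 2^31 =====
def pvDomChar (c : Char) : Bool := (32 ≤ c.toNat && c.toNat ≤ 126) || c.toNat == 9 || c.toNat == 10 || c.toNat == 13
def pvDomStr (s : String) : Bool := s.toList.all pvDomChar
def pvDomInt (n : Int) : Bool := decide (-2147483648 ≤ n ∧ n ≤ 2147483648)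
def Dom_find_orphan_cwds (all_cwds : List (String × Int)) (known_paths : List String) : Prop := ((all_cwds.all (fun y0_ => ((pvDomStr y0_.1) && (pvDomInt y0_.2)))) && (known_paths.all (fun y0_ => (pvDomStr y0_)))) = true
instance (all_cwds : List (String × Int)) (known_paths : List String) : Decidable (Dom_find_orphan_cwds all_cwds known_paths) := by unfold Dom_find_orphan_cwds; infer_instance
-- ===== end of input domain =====

-- B replaces A's per-cwd scan over every known path by membership tests of the
-- cwd and its '/'-boundary ancestor prefixes in the known-path set (faster).

-- ===== PORT A =====
def find_orphan_cwds (all_cwds : List (String × Int)) (known_paths : List String) : List (String × Int) :=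
  -- orphans = defaultdict(int); known_set = set(known_paths); loop over all_cwds.items()
  let known_set : PySem.Set String := PySem.Set.ofList known_paths
  ((PySem.Dict.ofList all_cwds).items.foldl
    (fun (orphans : PySem.Dict String Int) cc =>
      if PySem.Str.startswith cc.1 "/sessions/" then orphans
      else
        -- inner loop with break = any over the set (order-independent)
        let matched := known_set.any (fun known => cc.1 == known || PySem.Str.startswith cc.1 (known ++ "/"))
        if matched then orphans
        else orphans.modify cc.1 0 (· + cc.2))
    PySem.Dict.empty).items

-- ===== PORT B =====
def find_orphan_cwds_alt (all_cwds : List (String × Int)) (known_paths : List String) : List (String × Int) :=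
  let known : PySem.Set String := PySem.Set.ofList known_paths
  ((PySem.Dict.ofList all_cwds).items.foldl
    (fun (orphans : PySem.Dict String Int) cc =>
      if PySem.Str.startswith cc.1 "/sessions/" then orphans
      else if known.contains cc.1 then orphans
      -- any(cwd[:i] in known for i, ch in enumerate(cwd) if ch == "/")
      else if (PySem.List.enumerate cc.1.toList 0).any
          (fun ic => ic.2 == '/' && known.contains (String.ofList (PySem.List.slice cc.1.toList none (some ic.1)))) then orphans
      else orphans.insert cc.1 (orphans.getD cc.1 0 + cc.2))
    PySem.Dict.empty).items

-- ===== PRECONDITION & SPEC =====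
def Spec_find_orphan_cwds (all_cwds : List (String × Int)) (known_paths : List String) (out : List (String × Int)) : Prop := out = find_orphan_cwds_alt all_cwds known_paths
instance (all_cwds : List (String × Int)) (known_paths : List String) (out : List (String × Int)) : Decidable (Spec_find_orphan_cwds all_cwds known_paths out) := by unfold Spec_find_orphan_cwds; infer_instance

-- ===== CLAIM (what is proved, stated in full; the proofs are below) =====
def Claim_equal_find_orphan_cwds : Prop := ∀ (all_cwds : List (String × Int)) (known_paths : List String), Dom_find_orphan_cwds all_cwds known_paths → Spec_find_orphan_cwds all_cwds known_paths (find_orphan_cwds all_cwds known_paths)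

-- ===== LEMMAS AND PROOFS =====

-- k ++ "/" is a prefix of c exactly when some '/'-position i of c has c.take i = k
lemma slashPrefix_iff (c k : List Char) :
    k ++ ['/'] <+: c ↔ ∃ i : Nat, ∃ h : i < c.length, getElem c i h = '/' ∧ c.take i = k := by
  constructor
  · rintro ⟨t, rfl⟩
    refine ⟨k.length, by simp, ?_, ?_⟩ <;> simp
  · rintro ⟨i, h, hc, rfl⟩
    refine ⟨c.drop (i+1), ?_⟩
    rw [List.append_assoc]
    show c.take i ++ ('/' :: c.drop (i+1)) = c
    rw [← hc, List.getElem_cons_drop h, List.take_append_drop]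

-- A's matched flag equals B's ancestor-prefix membership test
lemma match_eq (cwd : String) (K : List String) :
    (K.any fun k => cwd == k || PySem.Str.startswith cwd (k ++ "/"))
    = (K.contains cwd || (PySem.List.enumerate cwd.toList 0).any
        (fun ic => ic.2 == '/' && K.contains (String.ofList (PySem.List.slice cwd.toList none (some ic.1))))) := by
  rw [Bool.eq_iff_iff]
  simp only [List.any_eq_true, Bool.or_eq_true, Bool.and_eq_true, beq_iff_eq,
    List.contains_iff_mem, PySem.Str.startswith_eq, PySem.Chars.startswith_iff,
    String.toList_append, show ("/" : String).toList = ['/'] from rfl,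
    PySem.List.mem_enumerate_iff]
  constructor
  · rintro ⟨k, hk, rfl | hpre⟩
    · exact Or.inl hk
    · rcases (slashPrefix_iff cwd.toList k.toList).mp hpre with ⟨i, h, hc, ht⟩
      refine Or.inr ⟨((0:Int) + i, getElem cwd.toList i h), ⟨i, h, rfl⟩, hc, ?_⟩
      rw [zero_add, PySem.List.slice_to_natCast, ht]
      simpa using hk
  · rintro (h | ⟨p, ⟨n, hn, rfl⟩, h2, h3⟩)
    · exact ⟨cwd, h, Or.inl rfl⟩
    · simp only [zero_add, PySem.List.slice_to_natCast] at h3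
      refine ⟨String.ofList (cwd.toList.take n), h3, Or.inr ?_⟩
      exact (slashPrefix_iff cwd.toList _).mpr ⟨n, hn, by simpa using h2, String.toList_ofList.symm⟩

-- if (x || y) … is the two nested ifs
lemma if_or_split {β : Type} (x y : Bool) (o a : β) :
    (if (x || y) = true then o else a) = (if x = true then o else if y = true then o else a) := by
  cases x <;> cases y <;> simp

-- d[k] += v : modify with default 0 is insert of getD + v
lemma modify_eq_insert (d : PySem.Dict String Int) (k : String) (v : Int) :
    d.modify k 0 (· + v) = d.insert k (d.getD k 0 + v) := rfl

-- ===== VERDICT (by name: the statement is the Claim_ definition above) =====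
theorem find_orphan_cwds_spec : Claim_equal_find_orphan_cwds := by
  intro all_cwds known_paths _
  unfold Spec_find_orphan_cwds find_orphan_cwds find_orphan_cwds_alt
  refine congrArg PySem.Dict.items (PySem.List.foldl_congr_mem _ _ _ _ ?_)
  intro o cc _
  dsimp only
  by_cases hs : PySem.Str.startswith cc.1 "/sessions/" = true
  · simp only [if_pos hs]
  · simp only [if_neg hs]
    rw [match_eq cc.1 (PySem.Set.ofList known_paths), modify_eq_insert, if_or_split]
    simp only [PySem.Set.contains]
    rfl
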